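-- pv_equiv track=rewrite | github.com/mdm508/epubHighlighter-main | parse.py | _strip_leading_parentheticals
-- ===== SOURCE A (Python) =====
-- def _strip_leading_parentheticals(text: str) -> str:
--     remaining = text.lstrip()
--     while remaining.startswith("("):
--         depth = 0
--         for idx, char in enumerate(remaining):
--             if char == "(":
--                 depth += 1
--             elif char == ")":
--                 depth -= 1
--                 if depth == 0:
--                     remaining = remaining[idx + 1 :].lstrip()
--                     break
--         else:
--             # Unbalanced parentheses, stop trimming.
--             return remaining.strip()
--     return remaining.strip()
-- ===== SOURCE B (Python) =====
-- def _strip_leading_parentheticals(text: str) -> str: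
--     n = len(text)
--     i = 0
--     while i < n and text[i].isspace():
--         i += 1
--     start = i
--     depth = 0
--     while i < n:
--         c = text[i]
--         if depth == 0:
--             if c == '(':
--                 start = i
--                 depth = 1
--             else:
--                 break
--         elif c == '(':
--             depth += 1
--         elif c == ')':
--             depth -= 1
--             if depth == 0:
--                 i += 1
--                 while i < n and text[i].isspace():
--                     i += 1
--                 continue
--         i += 1
--     if depth > 0:
--         return text[start:].strip()
--     return text[i:].strip()
-- ===== Notes on version B (the rewrite author's own statement) =====
-- stated objective: alternative
-- what changed: Replaces A's repeated slice-then-lstrip while loop (re-slicing the string after each balanced group) by a single left-to-right scan that keeps an index, a depth counter and the current group's start, skipping whitespace in place between groups.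
import Mathlib
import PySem

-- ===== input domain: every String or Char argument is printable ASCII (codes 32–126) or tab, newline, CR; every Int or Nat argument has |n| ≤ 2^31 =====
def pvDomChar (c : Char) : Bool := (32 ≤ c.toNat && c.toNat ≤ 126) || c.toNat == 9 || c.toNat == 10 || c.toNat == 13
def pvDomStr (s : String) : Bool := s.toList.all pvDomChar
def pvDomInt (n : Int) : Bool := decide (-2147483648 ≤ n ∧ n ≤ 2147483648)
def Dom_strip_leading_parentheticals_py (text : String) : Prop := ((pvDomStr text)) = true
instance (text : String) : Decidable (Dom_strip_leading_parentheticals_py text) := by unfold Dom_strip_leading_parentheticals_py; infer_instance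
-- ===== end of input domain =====

-- B replaces A's repeated slice-and-lstrip while-loop by a single left-to-right scan with a
-- depth counter and a saved group start (objective: alternative decomposition, same O(n) cost).

-- ===== PORT A =====
-- A's inner `for idx, char in enumerate(remaining)` loop: returns the suffix after the
-- matching close paren (remaining[idx+1:]), or none when the for-loop exhausts (unbalanced).
def pvAFind : List Char → Int → Option (List Char)
  | [], _ => none
  | c :: rest, depth =>
    if c = '(' then pvAFind rest (depth + 1)
    else if c = ')' then
      if depth - 1 = 0 then some rest
      else pvAFind rest (depth - 1)
    else pvAFind rest depth

lemma pvAFind_length_lt : ∀ (cs : List Char) (d : Int) (r : List Char),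
    pvAFind cs d = some r → r.length < cs.length := by
  intro cs
  induction cs with
  | nil => intro d r h; simp [pvAFind] at h
  | cons c rest ih =>
    intro d r h
    simp only [pvAFind] at h
    split_ifs at h with h1 h2 h3
    · exact Nat.lt_succ_of_lt (ih _ _ h)
    · cases h; simp
    · exact Nat.lt_succ_of_lt (ih _ _ h)
    · exact Nat.lt_succ_of_lt (ih _ _ h)

-- A's outer `while remaining.startswith("(")` loop; both exits return remaining.strip().
def pvALoop (remaining : List Char) : List Char :=
  if PySem.Chars.startswith remaining ['('] = true then
    match hfind : pvAFind remaining 0 with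
    | some rest => pvALoop (PySem.Chars.lstrip rest)
    | none => PySem.Chars.strip remaining
  else PySem.Chars.strip remaining
termination_by remaining.length
decreasing_by
  have h1 := pvAFind_length_lt _ _ _ hfind
  have h2 := List.length_dropWhile_le PySem.Chars.isspace rest
  simp only [PySem.Chars.lstrip]
  omega

def strip_leading_parentheticals_py (text : String) : String :=
  String.mk (pvALoop (PySem.Chars.lstrip text.toList))

-- ===== PORT B =====
-- B's `while i < n and text[i].isspace(): i += 1` whitespace-skipping loop.
def pvSkipWs : List Char → List Char
  | [] => []
  | c :: rest => if PySem.Chars.isspace c then pvSkipWs rest else c :: rest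

lemma pvSkipWs_length_le (cs : List Char) : (pvSkipWs cs).length ≤ cs.length := by
  induction cs with
  | nil => simp [pvSkipWs]
  | cons c rest ih => simp only [pvSkipWs]; split_ifs <;> simp; omega

-- B's single scanning while-loop: `rest` is the text from position i, `saved` the text from
-- `start` (the current top-level group's opening paren, for the unbalanced case).
def pvBGo : List Char → Nat → List Char → List Char
  | [], depth, saved => if depth > 0 then saved else []
  | c :: rest, depth, saved =>
    if depth = 0 then
      if c = '(' then pvBGo rest 1 (c :: rest)
      else c :: rest
    else if c = '(' then pvBGo rest (depth + 1) saved
    else if c = ')' then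
      if depth = 1 then pvBGo (pvSkipWs rest) 0 saved
      else pvBGo rest (depth - 1) saved
    else pvBGo rest depth saved
termination_by rest _ _ => rest.length
decreasing_by
  all_goals simp_wf
  all_goals first
    | omega
    | (have := pvSkipWs_length_le rest; omega)

def strip_leading_parentheticals_py_alt (text : String) : String :=
  String.mk (PySem.Chars.strip (pvBGo (pvSkipWs text.toList) 0 (pvSkipWs text.toList)))

-- ===== PRECONDITION & SPEC =====
def Spec_strip_leading_parentheticals_py (text : String) (out : String) : Prop := out = strip_leading_parentheticals_py_alt text
instance (text : String) (out : String) : Decidable (Spec_strip_leading_parentheticals_py text out) := by unfold Spec_strip_leading_parentheticals_py; infer_instance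

-- ===== CLAIM (what is proved, stated in full; the proofs are below) =====
def Claim_equal_strip_leading_parentheticals_py : Prop := ∀ (text : String), Dom_strip_leading_parentheticals_py text → Spec_strip_leading_parentheticals_py text (strip_leading_parentheticals_py text)

-- ===== LEMMAS AND PROOFS =====

lemma pvSkipWs_eq_lstrip (cs : List Char) : pvSkipWs cs = PySem.Chars.lstrip cs := by
  induction cs with
  | nil => simp [pvSkipWs, PySem.Chars.lstrip]
  | cons c rest ih =>
    simp only [pvSkipWs, PySem.Chars.lstrip, List.dropWhile] at *
    split_ifs with h <;> simp_all

-- at depth 0 the result of pvBGo does not depend on `saved`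
lemma pvBGo_zero_saved (cs : List Char) (s s' : List Char) :
    pvBGo cs 0 s = pvBGo cs 0 s' := by
  cases cs with
  | nil => simp [pvBGo]
  | cons c rest => simp only [pvBGo]; split_ifs <;> rfl

-- B's scan at depth d ≥ 1 finds exactly the suffix A's inner loop finds
lemma pvBGo_pos_eq_find : ∀ (cs : List Char) (d : Nat) (s : List Char), 1 ≤ d →
    pvBGo cs d s = (match pvAFind cs (d : Int) with
      | some r => pvBGo (pvSkipWs r) 0 s
      | none => s) := by
  intro cs
  induction cs with
  | nil =>
    intro d s hd
    rw [pvBGo.eq_def, pvAFind.eq_def]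
    simp only []
    rw [if_pos (by omega : d > 0)]
  | cons c rest ih =>
    intro d s hd
    rw [pvBGo.eq_def, pvAFind.eq_def]
    simp only [if_neg (by omega : ¬ d = 0)]
    by_cases hp : c = '('
    · have hcast : ((d + 1 : Nat) : Int) = (d : Int) + 1 := by push_cast; ring
      simp only [hp]
      rw [ih (d + 1) s (by omega), hcast]
      simp
    · by_cases hq : c = ')'
      · by_cases h1 : d = 1
        · subst h1
          simp only [hq]
          simp
        · have hcast : ((d - 1 : Nat) : Int) = (d : Int) - 1 := by
            have h2 : 1 ≤ d := hd; push_cast [h2]; ring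
          simp only [hq, if_neg h1,
            if_neg (by omega : ¬ ((d : Int) - 1 = 0))]
          rw [ih (d - 1) s (by omega), hcast]
          simp
      · simp only [if_neg hp, if_neg hq]
        exact ih d s hd

lemma pvStartswith_paren {cs : List Char} (h : PySem.Chars.startswith cs ['('] = true) :
    ∃ t, cs = '(' :: t := by
  rw [PySem.Chars.startswith_iff _ _] at h
  obtain ⟨t, rfl⟩ := h
  exact ⟨t, rfl⟩

lemma pvALoop_eq_bgo : ∀ (cs : List Char),
    pvALoop cs = PySem.Chars.strip (pvBGo cs 0 cs) := by
  intro cs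
  induction cs using pvALoop.induct with
  | case1 cs hsw rest hfind ih =>
    obtain ⟨tail, rfl⟩ := pvStartswith_paren hsw
    rw [pvALoop, if_pos hsw, hfind]
    have hfind' : pvAFind tail 1 = some rest := by
      rw [pvAFind.eq_def] at hfind
      simpa using hfind
    have hb : pvBGo ('(' :: tail) 0 ('(' :: tail)
        = pvBGo (pvSkipWs rest) 0 ('(' :: tail) := by
      rw [pvBGo.eq_def]
      simp only [reduceIte]
      rw [pvBGo_pos_eq_find tail 1 ('(' :: tail) le_rfl]
      simp [hfind']
    rw [hb, pvBGo_zero_saved _ _ (pvSkipWs rest), pvSkipWs_eq_lstrip] at *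
    exact ih
  | case2 cs hsw hfind =>
    obtain ⟨tail, rfl⟩ := pvStartswith_paren hsw
    rw [pvALoop, if_pos hsw, hfind]
    have hfind' : pvAFind tail 1 = none := by
      rw [pvAFind.eq_def] at hfind
      simpa using hfind
    conv_rhs => rw [pvBGo.eq_def]
    simp only [reduceIte]
    rw [pvBGo_pos_eq_find tail 1 ('(' :: tail) le_rfl]
    simp [hfind']
  | case3 cs hsw =>
    rw [pvALoop, if_neg hsw]
    cases cs with
    | nil => rw [pvBGo.eq_def]; simp
    | cons c tail =>
      have hc : ¬ c = '(' := by
        intro h; subst h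
        exact hsw ((PySem.Chars.startswith_iff _ _).mpr ⟨tail, rfl⟩)
      conv_rhs => rw [pvBGo.eq_def]
      simp [hc]

-- ===== VERDICT (by name: the statement is the Claim_ definition above) =====
theorem strip_leading_parentheticals_py_spec : Claim_equal_strip_leading_parentheticals_py := by
  intro text _
  unfold Spec_strip_leading_parentheticals_py strip_leading_parentheticals_py
    strip_leading_parentheticals_py_alt
  rw [pvALoop_eq_bgo, pvSkipWs_eq_lstrip]
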